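-- pv_equiv track=rewrite | github.com/mePrazen/Python_Project_1 | 24841288.py | get_sa3_and_related_sa2
-- ===== SOURCE A (Python) =====
-- def get_sa3_and_related_sa2(area_headers, area_data, target_sa2_code):
--     sa2_code_index = area_headers.index('SA2 code')
--     sa3_code_index = area_headers.index('SA3 code')
--
--     sa2_codes = area_data[sa2_code_index]
--     sa3_codes = area_data[sa3_code_index]
--
--     sa3_code = None
--     for i in range(len(sa2_codes)):
--         if sa2_codes[i] == target_sa2_code:
--             sa3_code = sa3_codes[i]
--             break
--
--     if sa3_code is None:
--         return None, []
--
--     related_sa2_codes = []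
--     for i in range(len(sa3_codes)):
--         if sa3_codes[i] == sa3_code:
--             related_sa2_codes.append(sa2_codes[i])
--
--     return sa3_code, related_sa2_codes
-- ===== SOURCE B (Python) =====
-- def get_sa3_and_related_sa2(area_headers, area_data, target_sa2_code):
--     sa2_col = area_data[area_headers.index('SA2 code')]
--     sa3_col = area_data[area_headers.index('SA3 code')]
--
--     # one pass: group sa3 -> [sa2...] in data order, and map sa2 -> sa3 (first occurrence wins)
--     groups = {}
--     sa2_to_sa3 = {}
--     for sa2, sa3 in zip(sa2_col, sa3_col):
--         groups.setdefault(sa3, []).append(sa2)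
--         sa2_to_sa3.setdefault(sa2, sa3)
--
--     sa3_code = sa2_to_sa3.get(target_sa2_code)
--     if sa3_code is None:
--         return None, []
--     return sa3_code, groups[sa3_code]
-- ===== Notes on version B (the rewrite author's own statement) =====
-- stated objective: alternative
-- what changed: Instead of A's two index-based scans (break-search for the target's SA3, then a second filtering scan), B makes one pass over the zipped columns building a sa3->list-of-sa2 grouping dict and a first-occurrence sa2->sa3 dict, then answers both questions by dict lookup.
import Mathlib
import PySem

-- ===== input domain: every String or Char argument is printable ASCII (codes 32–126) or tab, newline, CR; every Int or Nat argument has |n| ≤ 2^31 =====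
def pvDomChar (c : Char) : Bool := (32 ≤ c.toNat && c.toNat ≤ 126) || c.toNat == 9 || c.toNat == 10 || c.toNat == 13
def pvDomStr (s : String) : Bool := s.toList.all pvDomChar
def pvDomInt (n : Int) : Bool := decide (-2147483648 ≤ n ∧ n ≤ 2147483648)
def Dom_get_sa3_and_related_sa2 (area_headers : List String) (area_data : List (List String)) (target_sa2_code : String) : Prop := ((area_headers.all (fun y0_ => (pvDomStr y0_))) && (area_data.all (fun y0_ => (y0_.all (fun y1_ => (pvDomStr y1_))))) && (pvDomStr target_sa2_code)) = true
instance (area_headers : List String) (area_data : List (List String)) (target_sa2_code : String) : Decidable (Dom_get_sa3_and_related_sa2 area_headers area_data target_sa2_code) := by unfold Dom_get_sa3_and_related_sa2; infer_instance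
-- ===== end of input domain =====

-- B replaces A's two index-based scans by one pass over the zipped columns that builds a
-- sa3->list-of-sa2 grouping dict and a first-occurrence sa2->sa3 dict, then answers by lookup
-- (objective: alternative decomposition, same asymptotic cost).

-- ===== PORT A =====
-- first loop of A: for i in range(len(sa2_codes)): if sa2_codes[i] == target: sa3_code = sa3_codes[i]; break
-- (result none = loop fell through with sa3_code still None; a none from pyGet? models the
--  IndexError on ragged columns, which Pre_ excludes)
def aFirst (c2 c3 : List String) (t : String) (i : Nat) : Option String :=
  if _h : i < c2.length then
    if c2[i]! = t then PySem.List.pyGet? c3 (i : Int)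
    else aFirst c2 c3 t (i + 1)
  else none
termination_by c2.length - i

-- second loop of A: for i in range(len(sa3_codes)): if sa3_codes[i] == sa3_code: append sa2_codes[i]
-- (the pyGet? none branch models the IndexError on ragged columns, excluded by Pre_)
def aCollect (c2 c3 : List String) (s : String) (i : Nat) (acc : List String) : List String :=
  if _h : i < c3.length then
    if c3[i]! = s then
      match PySem.List.pyGet? c2 (i : Int) with
      | some v => aCollect c2 c3 s (i + 1) (acc ++ [v])
      | none => acc
    else aCollect c2 c3 s (i + 1) acc
  else acc
termination_by c3.length - i

def get_sa3_and_related_sa2 (area_headers : List String) (area_data : List (List String)) (target_sa2_code : String) : Option String × List String :=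
  match PySem.List.index? area_headers "SA2 code" with
  | none => (none, [])  -- ValueError, excluded by Pre_
  | some i2 =>
    match PySem.List.index? area_headers "SA3 code" with
    | none => (none, [])  -- ValueError, excluded by Pre_
    | some i3 =>
      match PySem.List.pyGet? area_data (i2 : Int) with
      | none => (none, [])  -- IndexError, excluded by Pre_
      | some c2 =>
        match PySem.List.pyGet? area_data (i3 : Int) with
        | none => (none, [])  -- IndexError, excluded by Pre_
        | some c3 =>
          match aFirst c2 c3 target_sa2_code 0 with
          | none => (none, [])
          | some s => (some s, aCollect c2 c3 s 0 [])

-- ===== PORT B =====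
-- the single loop of B: for sa2, sa3 in zip(...): groups.setdefault(sa3, []).append(sa2); sa2_to_sa3.setdefault(sa2, sa3)
def bLoop (rows : List (String × String)) (g : PySem.Dict String (List String)) (m : PySem.Dict String String) : PySem.Dict String (List String) × PySem.Dict String String :=
  rows.foldl (fun st p => (st.1.modify p.2 [] (· ++ [p.1]), st.2.setdefault p.1 p.2)) (g, m)

def get_sa3_and_related_sa2_alt (area_headers : List String) (area_data : List (List String)) (target_sa2_code : String) : Option String × List String :=
  match PySem.List.index? area_headers "SA2 code" with
  | none => (none, [])  -- ValueError
  | some i2 =>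
    match PySem.List.pyGet? area_data (i2 : Int) with
    | none => (none, [])  -- IndexError
    | some c2 =>
      match PySem.List.index? area_headers "SA3 code" with
      | none => (none, [])  -- ValueError
      | some i3 =>
        match PySem.List.pyGet? area_data (i3 : Int) with
        | none => (none, [])  -- IndexError
        | some c3 =>
          let gm := bLoop (c2.zip c3) PySem.Dict.empty PySem.Dict.empty
          match gm.2.get? target_sa2_code with
          | none => (none, [])
          | some s => (some s, gm.1.getD s [])
          -- groups[sa3_code]: the key is always present (any value of sa2_to_sa3 is a key of
          -- groups, both fed from the same zip rows), so getD never returns its default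

-- ===== PRECONDITION & SPEC =====
-- Pre_ holds exactly where the Python A returns without an exception: both header names occur,
-- both column indices are in range for area_data, and for the first row whose SA2 entry equals
-- the target (if any) the SA3 column reaches it and every row whose SA3 entry matches that row's
-- has an SA2 entry (otherwise A raises IndexError on ragged columns).
def preCols (c2 c3 : List String) (t : String) : Bool :=
  (List.range c2.length).all (fun j =>
    !(c2[j]! == t && (List.range j).all (fun k => !(c2[k]! == t))) ||
    (decide (j < c3.length) &&
      (List.range c3.length).all (fun i => !(c3[i]! == c3[j]!) || decide (i < c2.length))))

def preB (area_headers : List String) (area_data : List (List String)) (target_sa2_code : String) : Bool :=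
  match PySem.List.index? area_headers "SA2 code", PySem.List.index? area_headers "SA3 code" with
  | some i2, some i3 =>
    match PySem.List.pyGet? area_data (i2 : Int), PySem.List.pyGet? area_data (i3 : Int) with
    | some c2, some c3 => preCols c2 c3 target_sa2_code
    | _, _ => false
  | _, _ => false

def Pre_get_sa3_and_related_sa2 (area_headers : List String) (area_data : List (List String)) (target_sa2_code : String) : Prop :=
  preB area_headers area_data target_sa2_code = true
instance (area_headers : List String) (area_data : List (List String)) (target_sa2_code : String) : Decidable (Pre_get_sa3_and_related_sa2 area_headers area_data target_sa2_code) := by unfold Pre_get_sa3_and_related_sa2; infer_instance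

def pvWitness_get_sa3_and_related_sa2 : List String × List (List String) × String :=
  (["SA2 code", "SA3 code"], [["a", "b"], ["g", "g"]], "a")

def Spec_get_sa3_and_related_sa2 (area_headers : List String) (area_data : List (List String)) (target_sa2_code : String) (out : Option String × List String) : Prop := out = get_sa3_and_related_sa2_alt area_headers area_data target_sa2_code
instance (area_headers : List String) (area_data : List (List String)) (target_sa2_code : String) (out : Option String × List String) : Decidable (Spec_get_sa3_and_related_sa2 area_headers area_data target_sa2_code out) := by unfold Spec_get_sa3_and_related_sa2; infer_instance

-- ===== CLAIM (what is proved, stated in full; the proofs are below) =====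
def Claim_equal_get_sa3_and_related_sa2 : Prop := ∀ (area_headers : List String) (area_data : List (List String)) (target_sa2_code : String), Dom_get_sa3_and_related_sa2 area_headers area_data target_sa2_code → Pre_get_sa3_and_related_sa2 area_headers area_data target_sa2_code → Spec_get_sa3_and_related_sa2 area_headers area_data target_sa2_code (get_sa3_and_related_sa2 area_headers area_data target_sa2_code)

-- ===== LEMMAS AND PROOFS =====

-- first match in a list of (sa2, sa3) rows: reference function for both first loops
def firstMap (ps : List (String × String)) (t : String) : Option String :=
  match ps with
  | [] => none
  | p :: r => if p.1 = t then some p.2 else firstMap r t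

lemma bLoop_eq' (rows : List (String × String)) :
    ∀ (g : PySem.Dict String (List String)) (m : PySem.Dict String String),
      rows.foldl (fun st p => (st.1.modify p.2 [] (· ++ [p.1]), st.2.setdefault p.1 p.2)) (g, m) =
      (rows.foldl (fun g p => g.modify p.2 [] (· ++ [p.1])) g,
       rows.foldl (fun m p => m.setdefault p.1 p.2) m) := by
  induction rows with
  | nil => intro g m; rfl
  | cons p r ih => intro g m; simp [List.foldl_cons, ih]

lemma mget (ps : List (String × String)) :
    ∀ (m : PySem.Dict String String) (k : String),
      (ps.foldl (fun m p => m.setdefault p.1 p.2) m).get? k =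
        match m.get? k with
        | some v => some v
        | none => firstMap ps k := by
  induction ps with
  | nil => intro m k; cases hm : m.get? k <;> simp [List.foldl_nil, hm, firstMap]
  | cons p r ih =>
    intro m k
    rw [List.foldl_cons, ih]
    by_cases hc : m.contains p.1
    · rw [PySem.Dict.setdefault_of_contains _ _ hc]
      cases hm : m.get? k with
      | some v => simp
      | none =>
        simp only [firstMap]
        by_cases hk : p.1 = k
        · subst hk
          rw [PySem.Dict.contains_eq_isSome_get?] at hc
          simp [hm] at hc
        · simp [hk]
    · rw [PySem.Dict.setdefault_of_not_contains _ _ (by simpa using hc)]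
      rw [PySem.Dict.get?_insert]
      have hcn : m.get? p.1 = none := by
        rw [PySem.Dict.contains_eq_isSome_get?] at hc
        cases h : m.get? p.1 <;> simp [h] at hc ⊢
      by_cases hk : k = p.1
      · simp [hk, hcn, firstMap]
      · simp only [if_neg hk]
        cases hm : m.get? k with
        | some v => simp
        | none => simp [firstMap, Ne.symm hk]

lemma gget (ps : List (String × String)) :
    ∀ (g : PySem.Dict String (List String)) (s : String),
      (ps.foldl (fun g p => g.modify p.2 [] (· ++ [p.1])) g).getD s [] =
        g.getD s [] ++ (ps.filter (fun p => p.2 == s)).map Prod.fst := by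
  induction ps with
  | nil => intro g s; simp
  | cons p r ih =>
    intro g s
    rw [List.foldl_cons, ih, List.filter_cons]
    by_cases hs : p.2 = s
    · subst hs
      rw [PySem.Dict.getD_modify_self]
      simp
    · rw [PySem.Dict.getD_modify_of_ne _ _ _ (Ne.symm hs)]
      simp [hs]

lemma drop_zip_nil_right (c2 c3 : List String) (i : Nat) (h : c3.length ≤ i) :
    (c2.drop i).zip (c3.drop i) = [] := by
  rw [List.drop_eq_nil_of_le h, List.zip_nil_right]

lemma gbang (l : List String) (i : Nat) (h : i < l.length) : l[i]! = l[i] := by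
  simp [List.getElem!_eq_getElem?_getD, List.getElem?_eq_getElem h]

lemma aFirst_eq (c2 c3 : List String) (t : String) :
    ∀ i, aFirst c2 c3 t i = firstMap ((c2.drop i).zip (c3.drop i)) t := by
  intro i
  fun_induction aFirst c2 c3 t i with
  | case1 i h ht =>
    rw [gbang c2 i h] at ht
    by_cases h3 : i < c3.length
    · rw [PySem.List.pyGet?_ofNat c3 i h3,
        List.drop_eq_getElem_cons h, List.drop_eq_getElem_cons h3, List.zip_cons_cons]
      simp [firstMap, ht]
    · rw [drop_zip_nil_right c2 c3 i (by omega)]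
      rw [(PySem.List.pyGet?_eq_none_iff c3 i).2 (by
        simp [PySem.Raise.InRange]; omega)]
      rfl
  | case2 i h ht ih =>
    rw [gbang c2 i h] at ht
    by_cases h3 : i < c3.length
    · rw [List.drop_eq_getElem_cons h, List.drop_eq_getElem_cons h3, List.zip_cons_cons, ih]
      simp [firstMap, ht]
    · rw [drop_zip_nil_right c2 c3 i (by omega), ih, drop_zip_nil_right c2 c3 (i+1) (by omega)]
  | case3 i h =>
    rw [List.drop_eq_nil_of_le (by omega), List.zip_nil_left]
    rfl

lemma aCollect_eq (c2 c3 : List String) (s : String)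
    (H : ∀ i, i < c3.length → c3[i]! = s → i < c2.length) :
    ∀ i acc, aCollect c2 c3 s i acc =
      acc ++ (((c2.drop i).zip (c3.drop i)).filter (fun p => p.2 == s)).map Prod.fst := by
  intro i acc
  fun_induction aCollect c2 c3 s i acc with
  | case1 i acc h ht v hv ih =>
    have h2 : i < c2.length := H i h (by rw [gbang c3 i h] at ht ⊢; exact ht)
    rw [gbang c3 i h] at ht
    rw [PySem.List.pyGet?_ofNat c2 i h2] at hv
    injection hv with hv
    rw [ih, List.drop_eq_getElem_cons h, List.drop_eq_getElem_cons h2, List.zip_cons_cons,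
      List.filter_cons]
    simp [ht, ← hv]
  | case2 i acc h ht hv =>
    exfalso
    have h2 : i < c2.length := H i h ht
    rw [PySem.List.pyGet?_ofNat c2 i h2] at hv
    simp at hv
  | case3 i acc h ht ih =>
    rw [gbang c3 i h] at ht
    by_cases h2 : i < c2.length
    · rw [ih, List.drop_eq_getElem_cons h, List.drop_eq_getElem_cons h2, List.zip_cons_cons,
        List.filter_cons]
      simp [ht]
    · rw [ih, List.drop_eq_nil_of_le (show c2.length ≤ i + 1 by omega),
        List.drop_eq_nil_of_le (show c2.length ≤ i by omega)]
      simp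
  | case4 i acc h =>
    rw [drop_zip_nil_right c2 c3 i (by omega)]
    simp

lemma firstMap_zip_some (c2 : List String) : ∀ (c3 : List String) (t s : String),
    firstMap (c2.zip c3) t = some s →
    ∃ j, j < c2.length ∧ j < c3.length ∧ c2[j]! = t ∧ (∀ k, k < j → c2[k]! ≠ t) ∧ c3[j]! = s := by
  induction c2 with
  | nil => intro c3 t s h; simp [firstMap] at h
  | cons a l ih =>
    intro c3 t s h
    cases c3 with
    | nil => simp [firstMap] at h
    | cons b m =>
      rw [List.zip_cons_cons] at h
      simp only [firstMap] at h
      by_cases hat : a = t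
      · refine ⟨0, by simp, by simp, by simpa using hat, fun k hk => absurd hk (by omega), ?_⟩
        simp [hat] at h
        simpa using h
      · simp [hat] at h
        obtain ⟨j, hj2, hj3, hjt, hjf, hjs⟩ := ih m t s h
        refine ⟨j + 1, by simpa using hj2, by simpa using hj3, by simpa using hjt, ?_, by simpa using hjs⟩
        intro k hk
        cases k with
        | zero => simpa using hat
        | succ k => simpa using hjf k (by omega)

-- ===== VERDICT (by name: the statement is the Claim_ definition above) =====
theorem get_sa3_and_related_sa2_spec : Claim_equal_get_sa3_and_related_sa2 := by
  intro hs ds t _ hpre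
  unfold Spec_get_sa3_and_related_sa2 get_sa3_and_related_sa2 get_sa3_and_related_sa2_alt
  unfold Pre_get_sa3_and_related_sa2 preB at hpre
  cases h2 : PySem.List.index? hs "SA2 code" with
  | none => rfl
  | some i2 =>
  cases h3 : PySem.List.index? hs "SA3 code" with
  | none => simp only; cases PySem.List.pyGet? ds (i2 : Int) <;> rfl
  | some i3 =>
  simp only at hpre ⊢
  cases hg2 : PySem.List.pyGet? ds (i2 : Int) with
  | none => rfl
  | some c2 =>
  cases hg3 : PySem.List.pyGet? ds (i3 : Int) with
  | none => rfl
  | some c3 =>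
  rw [h2, h3] at hpre
  simp only at hpre ⊢
  unfold bLoop
  rw [bLoop_eq']
  simp only [mget, PySem.Dict.get?_empty]
  rw [aFirst_eq c2 c3 t 0]
  simp only [List.drop_zero]
  cases hfm : firstMap (c2.zip c3) t with
  | none => rfl
  | some s =>
  simp only
  rw [hg2, hg3] at hpre
  simp only at hpre
  obtain ⟨j, hj2, hj3, hjt, hjf, hjs⟩ := firstMap_zip_some c2 c3 t s hfm
  have H : ∀ i, i < c3.length → c3[i]! = s → i < c2.length := by
    simp [preCols] at hpre
    simp only [List.getElem!_eq_getElem?_getD] at hjt hjf hjs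
    intro i hi hse
    simp only [List.getElem!_eq_getElem?_getD] at hse
    rcases hpre j hj2 with (hne | ⟨k, hk, hkt⟩) | ⟨_, Hm⟩
    · exact absurd hjt hne
    · exact absurd hkt (hjf k hk)
    · rcases Hm i hi with hne | hlt
      · exact absurd (hse.trans hjs.symm) hne
      · exact hlt
  rw [aCollect_eq c2 c3 s H 0 [], gget, PySem.Dict.getD_empty]
  simp
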